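-- pv_equiv track=rewrite | github.com/pypi-data/pypi-mirror-124 | packages/pymoas/pymoas-0.25.tar.gz/pymoas-0.25/pymoas/symbols.py | symbols_in
-- ===== SOURCE A (Python) =====
-- def symbols_in(text, symbol):
--     i = 0
--     letter = ''
--     length: int = len(text)
--     while i < length:
--         letter += symbol+text[i]+symbol
--         i += 1
--     return letter
-- ===== SOURCE B (Python) =====
-- def symbols_in(text, symbol):
--     if not text:
--         return ''
--     return symbol + (symbol * 2).join(text) + symbol
-- ===== Notes on version B (the rewrite author's own statement) =====
-- stated objective: faster
-- what changed: Replaces the index-driven accumulator loop (quadratic string re-building) with a single str.join over the characters using a doubled-symbol separator plus boundary symbols.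
import Mathlib
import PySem

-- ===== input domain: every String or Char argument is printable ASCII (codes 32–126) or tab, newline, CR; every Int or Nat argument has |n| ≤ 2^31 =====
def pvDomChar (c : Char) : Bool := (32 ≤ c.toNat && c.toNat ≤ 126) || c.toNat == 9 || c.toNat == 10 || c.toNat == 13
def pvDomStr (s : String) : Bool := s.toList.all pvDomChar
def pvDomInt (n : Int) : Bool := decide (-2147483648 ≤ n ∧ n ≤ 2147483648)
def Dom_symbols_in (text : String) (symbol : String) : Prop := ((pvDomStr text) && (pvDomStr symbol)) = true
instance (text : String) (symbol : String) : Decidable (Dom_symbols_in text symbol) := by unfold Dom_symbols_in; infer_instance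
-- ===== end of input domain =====

-- B replaces A's per-character string-accumulator loop by one join with a doubled-symbol separator (faster in a timing run).

-- ===== PORT A =====
-- A: index loop i = 0..len-1 appending symbol+text[i]+symbol to an accumulator; ported as a
-- left fold over the character list (the same accumulator state, characters in the same order).
def symbols_in (text : String) (symbol : String) : String :=
  String.ofList (text.toList.foldl
    (fun letter c => letter ++ symbol.toList ++ [c] ++ symbol.toList) [])

-- ===== PORT B =====
-- B: '' for empty text, else symbol + (symbol*2).join(text) + symbol; join over the characters
-- of text is List.intercalate of the doubled separator over the singleton character lists.
def symbols_in_alt (text : String) (symbol : String) : String :=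
  if text.toList = [] then ""
  else
    String.ofList (symbol.toList ++
      List.intercalate (symbol.toList ++ symbol.toList) (text.toList.map (fun c => [c])) ++
      symbol.toList)

-- ===== PRECONDITION & SPEC =====
def Spec_symbols_in (text : String) (symbol : String) (out : String) : Prop := out = symbols_in_alt text symbol
instance (text : String) (symbol : String) (out : String) : Decidable (Spec_symbols_in text symbol out) := by unfold Spec_symbols_in; infer_instance

-- ===== CLAIM (what is proved, stated in full; the proofs are below) =====
def Claim_equal_symbols_in : Prop := ∀ (text : String) (symbol : String), Dom_symbols_in text symbol → Spec_symbols_in text symbol (symbols_in text symbol)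

-- ===== LEMMAS AND PROOFS =====

-- A's fold is a flatMap of the per-character wrap.
theorem symbols_in_foldl_eq_flatMap (s : List Char) (l acc : List Char) :
    l.foldl (fun letter c => letter ++ s ++ [c] ++ s) acc
      = acc ++ l.flatMap (fun c => s ++ [c] ++ s) := by
  induction l generalizing acc with
  | nil => simp
  | cons c t ih => simp [List.foldl, List.flatMap]

-- Join over singleton characters unfolds one step at a time.
theorem join_map_singleton_cons (s : List Char) (c d : Char) (t : List Char) :
    List.intercalate (s ++ s) ((c :: d :: t).map (fun c => [c]))
      = [c] ++ (s ++ s) ++ List.intercalate (s ++ s) ((d :: t).map (fun c => [c])) := by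
  simp [List.intercalate]

-- On a nonempty list the flatMap is the interior join with the boundary symbols.
theorem flatMap_wrap_eq_join (s : List Char) (c : Char) (t : List Char) :
    (c :: t).flatMap (fun c => s ++ [c] ++ s)
      = s ++ List.intercalate (s ++ s) ((c :: t).map (fun c => [c])) ++ s := by
  induction t generalizing c with
  | nil => simp [List.intercalate]
  | cons d t ih =>
      rw [List.flatMap_cons, ih d, join_map_singleton_cons]
      simp

-- ===== VERDICT (by name: the statement is the Claim_ definition above) =====
theorem symbols_in_spec : Claim_equal_symbols_in := by
  intro text symbol _
  unfold Spec_symbols_in symbols_in symbols_in_alt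
  cases h : text.toList with
  | nil => rfl
  | cons c t =>
      simp only [List.cons_ne_nil, ite_false]
      rw [symbols_in_foldl_eq_flatMap, List.nil_append, flatMap_wrap_eq_join]
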